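-- pv_equiv track=rewrite | github.com/minkaas/AdventOfCode_2 | 2024/Day15/Day15.py | widen
-- ===== SOURCE A (Python) =====
-- def widen(map_grid):
--     new_map = []
--     for i in range(0, len(map_grid)):
--         to_add = []
--         for j in range(0, len(map_grid[i])):
--             if map_grid[i][j] == '#':
--                 to_add.append('#')
--                 to_add.append('#')
--             elif map_grid[i][j] == 'O':
--                 to_add.append('[')
--                 to_add.append(']')
--             elif map_grid[i][j] == '@':
--                 to_add.append('@')
--                 to_add.append('.')
--             else:
--                 to_add.append('.')
--                 to_add.append('.')
--         new_map.append(to_add)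
--     return new_map
-- ===== SOURCE B (Python) =====
-- def _left(ch):
--     return {'#': '#', 'O': '[', '@': '@'}.get(ch, '.')
--
-- def _right(ch):
--     return {'#': '#', 'O': ']'}.get(ch, '.')
--
-- def widen(map_grid):
--     # staged: compute the left-half and right-half projections of each row
--     # in two separate passes, then interleave them.
--     out = []
--     for row in map_grid:
--         lefts = [_left(ch) for ch in row]
--         rights = [_right(ch) for ch in row]
--         out.append([c for pair in zip(lefts, rights) for c in pair])
--     return out
-- ===== Notes on version B (the rewrite author's own statement) =====
-- stated objective: alternative
-- what changed: Instead of one pass appending both output characters per cell, B decomposes each cell's expansion into independent left-half and right-half projections, computes them in two separate passes over the row, and interleaves the two lists with zip.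
import Mathlib
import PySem

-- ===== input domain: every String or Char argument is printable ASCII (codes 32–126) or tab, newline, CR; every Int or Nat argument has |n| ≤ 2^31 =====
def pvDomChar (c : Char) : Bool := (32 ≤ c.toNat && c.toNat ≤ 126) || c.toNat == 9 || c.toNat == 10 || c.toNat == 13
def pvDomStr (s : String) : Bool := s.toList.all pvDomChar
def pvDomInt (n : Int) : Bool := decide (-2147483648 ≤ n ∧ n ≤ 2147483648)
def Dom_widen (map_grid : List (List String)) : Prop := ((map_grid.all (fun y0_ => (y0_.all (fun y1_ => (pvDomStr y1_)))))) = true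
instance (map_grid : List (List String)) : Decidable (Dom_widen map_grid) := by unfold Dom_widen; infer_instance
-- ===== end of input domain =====

-- B decomposes each cell's two-character expansion into separate left-half and
-- right-half passes over the row and interleaves them with zip (alternative
-- decomposition; same cost).


-- ===== PORT A =====
def widen (map_grid : List (List String)) : List (List String) :=
  (PySem.List.pyRange 0 map_grid.length 1).foldl (fun new_map i =>
    let row := PySem.List.pyGetD map_grid i []
    let to_add := (PySem.List.pyRange 0 row.length 1).foldl (fun ta j =>
      let c := PySem.List.pyGetD row j ""
      if c = "#" then (ta ++ ["#"]) ++ ["#"]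
      else if c = "O" then (ta ++ ["["]) ++ ["]"]
      else if c = "@" then (ta ++ ["@"]) ++ ["."]
      else (ta ++ ["."]) ++ ["."]) ([] : List String)
    new_map ++ [to_add]) []

-- ===== PORT B =====
def leftOf (ch : String) : String :=
  (PySem.Dict.ofList [("#", "#"), ("O", "["), ("@", "@")]).getD ch "."

def rightOf (ch : String) : String :=
  (PySem.Dict.ofList [("#", "#"), ("O", "]")]).getD ch "."

def widen_alt (map_grid : List (List String)) : List (List String) :=
  map_grid.foldl (fun out row =>
    let lefts := row.map leftOf
    let rights := row.map rightOf
    out ++ [(lefts.zip rights).flatMap (fun p => [p.1, p.2])]) []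

-- ===== PRECONDITION & SPEC =====
def Spec_widen (map_grid : List (List String)) (out : List (List String)) : Prop := out = widen_alt map_grid
instance (map_grid : List (List String)) (out : List (List String)) : Decidable (Spec_widen map_grid out) := by unfold Spec_widen; infer_instance

-- ===== CLAIM (what is proved, stated in full; the proofs are below) =====
def Claim_equal_widen : Prop := ∀ (map_grid : List (List String)), Dom_widen map_grid → Spec_widen map_grid (widen map_grid)

-- ===== LEMMAS AND PROOFS =====

-- per-cell: the if/elif chain emits exactly the left and right projections
theorem cell_eq (c : String) :
    (if c = "#" then (["#"] : List String) ++ ["#"]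
     else if c = "O" then ["["] ++ ["]"]
     else if c = "@" then ["@"] ++ ["."]
     else ["."] ++ ["."]) = [leftOf c, rightOf c] := by
  unfold leftOf rightOf
  have h1 : PySem.Dict.ofList [("#", "#"), ("O", "["), ("@", "@")]
      = PySem.Dict.mk [("#", "#"), ("O", "["), ("@", "@")] := by decide
  have h2 : PySem.Dict.ofList [("#", "#"), ("O", "]")]
      = PySem.Dict.mk [("#", "#"), ("O", "]")] := by decide
  rw [h1, h2]
  split_ifs with a b d
  · subst a; decide
  · subst b; decide
  · subst d; decide
  · simp [PySem.Dict.getD, PySem.Dict.get?_mk_cons, PySem.Dict.get?,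
      Ne.symm a, Ne.symm b, Ne.symm d]

-- per-row: A's inner index loop equals B's zip-interleave of the two projections
theorem row_eq (row : List String) :
    (PySem.List.pyRange 0 row.length 1).foldl (fun ta j =>
      let c := PySem.List.pyGetD row j ""
      if c = "#" then (ta ++ ["#"]) ++ ["#"]
      else if c = "O" then (ta ++ ["["]) ++ ["]"]
      else if c = "@" then (ta ++ ["@"]) ++ ["."]
      else (ta ++ ["."]) ++ ["."]) ([] : List String)
    = ((row.map leftOf).zip (row.map rightOf)).flatMap (fun p => [p.1, p.2]) := by
  rw [PySem.List.foldl_pyRange_zero_pyGetD' row "" (fun ta c =>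
      if c = "#" then (ta ++ ["#"]) ++ ["#"]
      else if c = "O" then (ta ++ ["["]) ++ ["]"]
      else if c = "@" then (ta ++ ["@"]) ++ ["."]
      else (ta ++ ["."]) ++ ["."]) []]
  have hcell : ∀ (ta : List String) (c : String),
      (if c = "#" then (ta ++ ["#"]) ++ ["#"]
       else if c = "O" then (ta ++ ["["]) ++ ["]"]
       else if c = "@" then (ta ++ ["@"]) ++ ["."]
       else (ta ++ ["."]) ++ ["."]) = ta ++ [leftOf c, rightOf c] := by
    intro ta c
    rw [← cell_eq c]
    split_ifs <;> simp
  have hzip : (row.map leftOf).zip (row.map rightOf)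
      = row.map (fun c => (leftOf c, rightOf c)) := by
    induction row with
    | nil => rfl
    | cons h t ih => simp [ih]
  calc row.foldl (fun ta c =>
        if c = "#" then (ta ++ ["#"]) ++ ["#"]
        else if c = "O" then (ta ++ ["["]) ++ ["]"]
        else if c = "@" then (ta ++ ["@"]) ++ ["."]
        else (ta ++ ["."]) ++ ["."]) []
      = row.foldl (fun ta c => ta ++ [leftOf c, rightOf c]) [] := by
        exact PySem.List.foldl_congr_mem _ _ _ _ (fun ta c _ => hcell ta c)
    _ = row.flatMap (fun c => [leftOf c, rightOf c]) := by
        rw [PySem.List.foldl_append_eq_flatMap]; simp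
    _ = ((row.map leftOf).zip (row.map rightOf)).flatMap (fun p => [p.1, p.2]) := by
        rw [hzip, List.flatMap_map]

-- ===== VERDICT (by name: the statement is the Claim_ definition above) =====
theorem widen_spec : Claim_equal_widen := by
  intro map_grid _
  show widen map_grid = widen_alt map_grid
  unfold widen widen_alt
  rw [PySem.List.foldl_pyRange_zero_pyGetD' map_grid [] (fun nm row =>
      nm ++ [(PySem.List.pyRange 0 row.length 1).foldl (fun ta j =>
        let c := PySem.List.pyGetD row j ""
        if c = "#" then (ta ++ ["#"]) ++ ["#"]
        else if c = "O" then (ta ++ ["["]) ++ ["]"]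
        else if c = "@" then (ta ++ ["@"]) ++ ["."]
        else (ta ++ ["."]) ++ ["."]) []]) []]
  exact PySem.List.foldl_congr_mem _ _ _ _ (fun out row _ => by
    simp only [row_eq row])
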